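-- pv_equiv track=rewrite | github.com/kotsky/programming-exercises | Bit Manipulation/Next Number.py | min_max_of_1s
-- ===== SOURCE A (Python) =====
-- def min_max_of_1s(number):
--     def get_count_of_1s_from(number):
--         count_of_1s = 0
--         count = 0
--
--         while number > 0:
--             remain = int(number % 2)
--             if remain == 1:
--                 count_of_1s += 1
--             number //= 2
--             count += 1
--
--         return count_of_1s, count
--
--     def get_min_number(count_1s):
--         min_number = 0
--
--         while count_1s > 0:
--             min_number += pow(2, count_1s-1)
--             count_1s -= 1
--
--         return min_number
--
--     def get_max_number(count_1s, total):
--         max_number = 0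
--
--         zeros_bias = total - count_1s
--
--         while count_1s > 0:
--             max_number += pow(2, count_1s-1 + zeros_bias)
--             count_1s -= 1
--
--         return max_number
--
--     bits_1s, total_bits = get_count_of_1s_from(number)
--     return get_min_number(bits_1s), get_max_number(bits_1s, total_bits)
-- ===== SOURCE B (Python) =====
-- def min_max_of_1s(number):
--     # One counting pass, then both answers in closed form by bit arithmetic.
--     ones = 0
--     total = 0
--     n = number
--     while n > 0:
--         n, r = divmod(n, 2)
--         ones += r
--         total += 1
--     lo = (1 << ones) - 1
--     return lo, lo << (total - ones)
-- ===== Notes on version B (the rewrite author's own statement) =====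
-- stated objective: simpler
-- what changed: A builds the min and max by two explicit bit-summing loops; B keeps one counting pass and constructs both results in closed form with shifts: lo = (1<<ones)-1 and hi = lo << (total-ones).
import Mathlib
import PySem

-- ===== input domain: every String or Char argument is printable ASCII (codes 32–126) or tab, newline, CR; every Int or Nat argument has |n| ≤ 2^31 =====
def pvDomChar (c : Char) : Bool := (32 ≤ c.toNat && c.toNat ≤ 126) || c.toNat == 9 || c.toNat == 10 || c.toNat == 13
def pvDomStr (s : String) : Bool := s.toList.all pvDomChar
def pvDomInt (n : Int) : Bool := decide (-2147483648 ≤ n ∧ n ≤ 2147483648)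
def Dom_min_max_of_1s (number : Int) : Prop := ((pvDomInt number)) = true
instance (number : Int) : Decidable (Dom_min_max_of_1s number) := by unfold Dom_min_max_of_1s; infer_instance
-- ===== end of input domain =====

-- B replaces A's two bit-summing construction loops by closed-form shift arithmetic (one counting pass remains); objective: simpler.

-- ===== PORT A =====
-- while loop of get_count_of_1s_from, tail-recursive over (count_of_1s, count)
def pvCountA (number count_of_1s count : Int) : Int × Int :=
  if number > 0 then
    let remain := PySem.Int.mod number 2   -- int(number % 2): number % 2 is already an int here
    pvCountA (PySem.Int.floordiv number 2)
      (if remain = 1 then count_of_1s + 1 else count_of_1s) (count + 1)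
  else (count_of_1s, count)
termination_by number.toNat
decreasing_by
  have h2 : PySem.Int.floordiv number 2 = number / 2 :=
    PySem.Int.floordiv_eq_ediv_of_pos (by omega)
  rw [h2]; omega

-- while loop of get_min_number; pow(2, count_1s-1) with count_1s-1 ≥ 0 is 2^(count_1s-1).toNat (exact there)
def pvMinA (count_1s min_number : Int) : Int :=
  if count_1s > 0 then
    pvMinA (count_1s - 1) (min_number + 2 ^ (count_1s - 1).toNat)
  else min_number
termination_by count_1s.toNat
decreasing_by omega

-- while loop of get_max_number; the pow exponent count_1s-1+zeros_bias is ≥ 0 whenever reached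
def pvMaxA (count_1s max_number zeros_bias : Int) : Int :=
  if count_1s > 0 then
    pvMaxA (count_1s - 1) (max_number + 2 ^ (count_1s - 1 + zeros_bias).toNat) zeros_bias
  else max_number
termination_by count_1s.toNat
decreasing_by omega

def min_max_of_1s (number : Int) : Int × Int :=
  let (bits_1s, total_bits) := pvCountA number 0 0
  (pvMinA bits_1s 0, pvMaxA bits_1s 0 (total_bits - bits_1s))

-- ===== PORT B =====
-- counting while loop of Source B: n, r = divmod(n, 2); ones += r; total += 1
def pvCountB (n ones total : Int) : Int × Int :=
  if n > 0 then
    pvCountB (PySem.Int.floordiv n 2) (ones + PySem.Int.mod n 2) (total + 1)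
  else (ones, total)
termination_by n.toNat
decreasing_by
  have h2 : PySem.Int.floordiv n 2 = n / 2 :=
    PySem.Int.floordiv_eq_ediv_of_pos (by omega)
  rw [h2]; omega

-- 1 << ones and lo << (total-ones): both shift amounts are ≥ 0, so x << k = x * 2^k exactly
def min_max_of_1s_alt (number : Int) : Int × Int :=
  let (ones, total) := pvCountB number 0 0
  let lo : Int := 2 ^ ones.toNat - 1
  (lo, lo * 2 ^ (total - ones).toNat)

-- ===== PRECONDITION & SPEC =====
def Spec_min_max_of_1s (number : Int) (out : Int × Int) : Prop := out = min_max_of_1s_alt number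
instance (number : Int) (out : Int × Int) : Decidable (Spec_min_max_of_1s number out) := by unfold Spec_min_max_of_1s; infer_instance

-- ===== CLAIM (what is proved, stated in full; the proofs are below) =====
def Claim_equal_min_max_of_1s : Prop := ∀ (number : Int), Dom_min_max_of_1s number → Spec_min_max_of_1s number (min_max_of_1s number)

-- ===== LEMMAS AND PROOFS =====

-- the two counting loops compute the same pair
theorem countA_eq_countB (n a b : Int) : pvCountA n a b = pvCountB n a b := by
  induction n, a, b using pvCountA.induct with
  | case1 n a b h r ih =>
      rw [pvCountA, pvCountB]
      simp only [h, if_pos]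
      simp only [dite_eq_ite, show r = PySem.Int.mod n 2 from rfl] at ih
      have hnn : 0 ≤ PySem.Int.mod n 2 := PySem.Int.mod_nonneg _ (by omega)
      have hlt : PySem.Int.mod n 2 < 2 := PySem.Int.mod_lt _ (by omega)
      have heq : (if PySem.Int.mod n 2 = 1 then a + 1 else a) = a + PySem.Int.mod n 2 := by
        split_ifs with h1 <;> omega
      rw [heq] at ih ⊢
      exact ih
  | case2 n a b h => rw [pvCountA, pvCountB]; simp [h]

-- the counting loop keeps ones ≤ total (each step adds at most 1 to ones)
theorem countB_le (n a b : Int) (hab : a ≤ b) :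
    (pvCountB n a b).1 ≤ (pvCountB n a b).2 := by
  induction n, a, b using pvCountB.induct with
  | case1 n a b h ih =>
      rw [pvCountB]; simp only [h, if_pos]
      exact ih (by have := PySem.Int.mod_lt n (b := 2) (by omega); omega)
  | case2 n a b h => rw [pvCountB]; simp [h, hab]

-- and ones stays ≥ its seed
theorem countB_fst_ge (n a b : Int) : a ≤ (pvCountB n a b).1 := by
  induction n, a, b using pvCountB.induct with
  | case1 n a b h ih =>
      rw [pvCountB]; simp only [h, if_pos]
      have := PySem.Int.mod_nonneg n (b := 2) (by omega)
      exact le_trans (by omega) ih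
  | case2 n a b h => rw [pvCountB]; simp [h]

-- closed form of A's min-building loop (for c ≤ 0 both sides are acc, since c.toNat = 0)
theorem minA_closed (c acc : Int) : pvMinA c acc = acc + 2 ^ c.toNat - 1 := by
  induction c, acc using pvMinA.induct with
  | case1 c acc h ih =>
      rw [pvMinA, if_pos h, ih]
      have hc : c.toNat = (c - 1).toNat + 1 := by omega
      rw [hc, pow_succ]; ring
  | case2 c acc h =>
      rw [pvMinA, if_neg h]
      have hz : c.toNat = 0 := by omega
      simp [hz]

-- closed form of A's max-building loop (0 ≤ zb lets the exponent split)
theorem maxA_closed (zb : Int) (hzb : 0 ≤ zb) (c acc : Int) :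
    pvMaxA c acc zb = acc + (2 ^ c.toNat - 1) * 2 ^ zb.toNat := by
  induction c, acc using pvMaxA.induct zb with
  | case1 c acc h ih =>
      rw [pvMaxA, if_pos h, ih]
      have hc : c.toNat = (c - 1).toNat + 1 := by omega
      have hs : (c - 1 + zb).toNat = (c - 1).toNat + zb.toNat := by omega
      rw [hc, hs, pow_succ, pow_add]; ring
  | case2 c acc h =>
      rw [pvMaxA, if_neg h]
      have hz : c.toNat = 0 := by omega
      simp [hz]

-- ===== VERDICT (by name: the statement is the Claim_ definition above) =====
theorem min_max_of_1s_spec : Claim_equal_min_max_of_1s := by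
  intro number _
  unfold Spec_min_max_of_1s min_max_of_1s min_max_of_1s_alt
  rw [countA_eq_countB]
  have h1 : (0:Int) ≤ (pvCountB number 0 0).1 := countB_fst_ge number 0 0
  have h2 : (pvCountB number 0 0).1 ≤ (pvCountB number 0 0).2 := countB_le number 0 0 le_rfl
  rcases hE : pvCountB number 0 0 with ⟨o, t⟩
  rw [hE] at h1 h2
  simp only
  rw [minA_closed, maxA_closed _ (by omega)]
  simp
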